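-- pv_equiv track=rewrite | github.com/CatRabbitBear/ml-harness | plugins/hmm_fx_daily/plugin.py | _select_proxy_columns
-- ===== SOURCE A (Python) =====
-- def _select_proxy_columns(feature_cols: list[str]) -> list[str]:
--     preferred = ["g_absret_rms", "g_rng_mean"]
--     proxies = [c for c in preferred if c in feature_cols]
--     if len(proxies) >= 2:
--         return proxies[:2]
--     for col in feature_cols:
--         if col not in proxies:
--             proxies.append(col)
--         if len(proxies) >= 2:
--             break
--     return proxies
-- ===== SOURCE B (Python) =====
-- def _select_proxy_columns(feature_cols: list[str]) -> list[str]: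
--     preferred = ["g_absret_rms", "g_rng_mean"]
--     proxies = [c for c in preferred if c in feature_cols]
--     return list(dict.fromkeys(proxies + feature_cols))[:2]
-- ===== Notes on version B (the rewrite author's own statement) =====
-- stated objective: simpler
-- what changed: Replaces the >=2 guard, early return, and break-loop with membership updates against a growing list by a single ordered dedup of proxies+feature_cols followed by a [:2] slice.
import Mathlib
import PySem

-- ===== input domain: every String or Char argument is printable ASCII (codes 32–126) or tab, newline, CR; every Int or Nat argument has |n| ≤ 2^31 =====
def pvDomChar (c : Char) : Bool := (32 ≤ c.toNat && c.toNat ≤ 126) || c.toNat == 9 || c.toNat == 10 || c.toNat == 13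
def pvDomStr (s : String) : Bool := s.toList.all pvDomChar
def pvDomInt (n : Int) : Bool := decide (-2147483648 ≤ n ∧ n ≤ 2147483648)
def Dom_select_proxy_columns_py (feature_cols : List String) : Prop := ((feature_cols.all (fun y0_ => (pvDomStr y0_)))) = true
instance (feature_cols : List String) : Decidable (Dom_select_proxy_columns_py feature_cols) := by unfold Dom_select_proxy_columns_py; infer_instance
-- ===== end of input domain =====

-- B replaces A's guard + early return + break-loop with one ordered dedup of proxies ++ feature_cols and a [:2] slice (simpler decomposition, same cost class).


-- ===== PORT A =====
-- the for-loop with 'if col not in proxies: append' and 'if len >= 2: break'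
def selectProxyLoop (proxies : List String) : List String → List String
  | [] => proxies
  | col :: rest =>
      let proxies' := if proxies.contains col then proxies else proxies ++ [col]
      if proxies'.length ≥ 2 then proxies' else selectProxyLoop proxies' rest

def select_proxy_columns_py (feature_cols : List String) : List String :=
  let preferred : List String := ["g_absret_rms", "g_rng_mean"]
  let proxies := preferred.filter (fun c => feature_cols.contains c)
  if proxies.length ≥ 2 then proxies.take 2
  else selectProxyLoop proxies feature_cols

-- ===== PORT B =====
-- list(dict.fromkeys(proxies + feature_cols))[:2]  (PySem.List.dedup = dict.fromkeys ordered dedup)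
def select_proxy_columns_py_alt (feature_cols : List String) : List String :=
  let preferred : List String := ["g_absret_rms", "g_rng_mean"]
  let proxies := preferred.filter (fun c => feature_cols.contains c)
  (PySem.List.dedup (proxies ++ feature_cols)).take 2

-- ===== PRECONDITION & SPEC =====
def Spec_select_proxy_columns_py (feature_cols : List String) (out : List String) : Prop := out = select_proxy_columns_py_alt feature_cols
instance (feature_cols : List String) (out : List String) : Decidable (Spec_select_proxy_columns_py feature_cols out) := by unfold Spec_select_proxy_columns_py; infer_instance

-- ===== CLAIM (what is proved, stated in full; the proofs are below) =====
def Claim_equal_select_proxy_columns_py : Prop := ∀ (feature_cols : List String), Dom_select_proxy_columns_py feature_cols → Spec_select_proxy_columns_py feature_cols (select_proxy_columns_py feature_cols)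

-- ===== LEMMAS AND PROOFS =====

-- Set.add only appends on the right, so any foldl of add keeps the seed as a prefix.
theorem foldl_add_prefix (xs : List String) : ∀ (s : List String), ∃ t, List.foldl PySem.Set.add s xs = s ++ t := by
  induction xs with
  | nil => intro s; exact ⟨[], by simp⟩
  | cons x xs ih =>
      intro s
      obtain ⟨t, ht⟩ := ih (PySem.Set.add s x)
      by_cases hx : x ∈ s
      · refine ⟨t, ?_⟩
        rw [List.foldl_cons, PySem.Set.add_of_mem hx]
        rw [PySem.Set.add_of_mem hx] at ht
        exact ht
      · refine ⟨x :: t, ?_⟩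
        rw [List.foldl_cons, PySem.Set.add_of_not_mem hx]
        rw [PySem.Set.add_of_not_mem hx] at ht
        simpa using ht

-- A's break-loop computes the first two elements of the ordered dedup fold, given a short nodup seed.
theorem loop_eq_foldl (xs : List String) : ∀ (proxies : List String), proxies.length < 2 →
    selectProxyLoop proxies xs = (List.foldl PySem.Set.add proxies xs).take 2 := by
  induction xs with
  | nil =>
      intro proxies h
      simp [selectProxyLoop, List.take_of_length_le (by omega : proxies.length ≤ 2)]
  | cons col rest ih =>
      intro proxies h
      by_cases hc : col ∈ proxies
      · have hcb : proxies.contains col = true := by simpa using hc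
        have h2 : ¬ proxies.length ≥ 2 := by omega
        simp only [selectProxyLoop, List.foldl_cons, PySem.Set.add_of_mem hc, hcb,
          if_true, h2, if_false]
        exact ih proxies h
      · have hcb : proxies.contains col = false := by simpa using hc
        simp only [selectProxyLoop, List.foldl_cons, PySem.Set.add_of_not_mem hc, hcb,
          Bool.false_eq_true, if_false]
        by_cases hl : (proxies ++ [col]).length ≥ 2
        · simp only [hl, if_true]
          obtain ⟨t, ht⟩ := foldl_add_prefix rest (proxies ++ [col])
          have hlen : (proxies ++ [col]).length = 2 := by
            simp at hl ⊢; omega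
          rw [ht, ← hlen, List.take_left]
        · simp only [hl, if_false]
          exact ih (proxies ++ [col]) (by omega)

theorem dedup_append_nodup (proxies xs : List String) (hnd : proxies.Nodup) :
    PySem.List.dedup (proxies ++ xs) = List.foldl PySem.Set.add proxies xs := by
  rw [PySem.List.dedup_eq_ofList, PySem.Set.ofList_eq_foldl, List.foldl_append]
  congr 1
  rw [← PySem.Set.ofList_eq_foldl]
  exact PySem.Set.ofList_eq_self_of_nodup _ hnd

-- ===== VERDICT (by name: the statement is the Claim_ definition above) =====
theorem select_proxy_columns_py_spec : Claim_equal_select_proxy_columns_py := by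
  intro feature_cols _
  unfold Spec_select_proxy_columns_py select_proxy_columns_py select_proxy_columns_py_alt
  simp only []
  set proxies := (["g_absret_rms", "g_rng_mean"] : List String).filter
      (fun c => feature_cols.contains c) with hp
  have hnd : proxies.Nodup := List.Nodup.filter _ (by decide)
  have hle : proxies.length ≤ 2 := List.length_filter_le _ _
  rw [dedup_append_nodup proxies feature_cols hnd]
  by_cases h2 : proxies.length ≥ 2
  · simp only [h2, if_true]
    obtain ⟨t, ht⟩ := foldl_add_prefix feature_cols proxies
    have hlen : proxies.length = 2 := by omega
    rw [ht, ← hlen, List.take_left, List.take_of_length_le (by omega)]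
  · simp only [h2, if_false]
    exact loop_eq_foldl feature_cols proxies (by omega)
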